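-- pv_equiv track=rewrite | github.com/littlezero48/Study-algorithm | 프로그래머스/2/87946. 피로도/피로도.py | solution
-- ===== SOURCE A (Python) =====
-- from itertools import permutations
--
-- def solution(k, dungeons):
-- 	dun_cnt_list = []
--
-- 	for perm in permutations(range(len(dungeons)), len(dungeons)):
-- 		temp_k = k
-- 		dun_cnt = 0
-- 		for i in perm:
-- 			need_k, use_k = dungeons[i]
-- 			if temp_k >= need_k:
-- 				dun_cnt += 1
-- 				temp_k -= use_k
-- 			dun_cnt_list.append(dun_cnt)
--
-- 	return max(dun_cnt_list)
-- ===== SOURCE B (Python) =====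
-- def solution(k, dungeons):
--     # Recursive backtracking over the remaining dungeons instead of enumerating
--     # all permutations; returns the best count reachable from the current state.
--     def dfs(temp_k, remaining):
--         best = 0
--         for d in remaining:
--             need_k, use_k = d
--             if temp_k >= need_k:
--                 rest = remaining.copy()
--                 rest.remove(d)
--                 cand = 1 + dfs(temp_k - use_k, rest)
--                 if cand > best:
--                     best = cand
--         return best
--     return dfs(k, dungeons)
-- ===== Notes on version B (the rewrite author's own statement) =====
-- stated objective: faster
-- what changed: Replaced the exhaustive scan of all n! index permutations (with per-permutation greedy counting) by a recursive backtracking search over the remaining dungeons that only descends into dungeons currently clearable and returns the best count directly.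
import Mathlib
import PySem

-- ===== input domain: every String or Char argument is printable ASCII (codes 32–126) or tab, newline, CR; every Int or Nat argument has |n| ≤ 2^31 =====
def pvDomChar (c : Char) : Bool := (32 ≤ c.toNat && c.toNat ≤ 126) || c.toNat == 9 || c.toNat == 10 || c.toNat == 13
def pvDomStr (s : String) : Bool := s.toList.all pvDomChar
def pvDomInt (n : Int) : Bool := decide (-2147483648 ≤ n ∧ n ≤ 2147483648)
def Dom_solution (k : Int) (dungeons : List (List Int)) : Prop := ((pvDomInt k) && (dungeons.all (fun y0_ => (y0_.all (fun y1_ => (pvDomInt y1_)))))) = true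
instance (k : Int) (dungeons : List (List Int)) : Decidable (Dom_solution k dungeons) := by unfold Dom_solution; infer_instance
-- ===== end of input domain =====

-- B replaces A's scan of all n! permutations by recursive backtracking over the
-- remaining dungeons, pruning orders whose next dungeon is not clearable.

-- ===== PORT A =====

-- itertools.permutations(l, len(l)) for a duplicate-free list l, in the same
-- element-first order (exact here: A only applies it to range(n), which is duplicate-free).
def pyPermutations (l : List Int) : List (List Int) :=
  if l.isEmpty then [[]]
  else l.attach.flatMap (fun x => (pyPermutations (l.erase x.1)).map (x.1 :: ·))
termination_by l.length
decreasing_by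
  have hm := x.2
  have h1 := List.length_erase_of_mem hm
  have h2 := List.length_pos_of_mem hm
  omega

-- one step of A's inner loop: state (temp_k, dun_cnt, dun_cnt_list), index i.
-- dungeons[i] and the 2-tuple unpack are ported with pyGetD: exact under Pre_solution
-- (i comes from a permutation of range(len(dungeons)) and every row has length 2).
def pvStepA (dungeons : List (List Int)) (st : Int × Int × List Int) (i : Int) : Int × Int × List Int :=
  let row := PySem.List.pyGetD dungeons i []
  let need_k := PySem.List.pyGetD row 0 0
  let use_k := PySem.List.pyGetD row 1 0
  if st.1 ≥ need_k then (st.1 - use_k, st.2.1 + 1, st.2.2 ++ [st.2.1 + 1])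
  else (st.1, st.2.1, st.2.2 ++ [st.2.1])

def solution (k : Int) (dungeons : List (List Int)) : Int :=
  let perms := pyPermutations (PySem.List.pyRange 0 (PySem.List.len dungeons) 1)
  let dun_cnt_list := perms.foldl (fun acc perm => (perm.foldl (pvStepA dungeons) (k, 0, acc)).2.2) []
  -- max(dun_cnt_list): exact under Pre_solution (dungeons ≠ [] makes the list nonempty)
  (PySem.List.max? dun_cnt_list (fun x => x)).getD 0

-- ===== PORT B =====

-- dfs(temp_k, remaining): best number of additional dungeons clearable.
-- rest = remaining.copy(); rest.remove(d) is ported as List.erase (exact: d ∈ remaining).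
def solution_alt_dfs (temp_k : Int) (remaining : List (List Int)) : Int :=
  remaining.attach.foldl
    (fun best d =>
      if temp_k ≥ PySem.List.pyGetD d.1 0 0 then
        if 1 + solution_alt_dfs (temp_k - PySem.List.pyGetD d.1 1 0) (remaining.erase d.1) > best
        then 1 + solution_alt_dfs (temp_k - PySem.List.pyGetD d.1 1 0) (remaining.erase d.1)
        else best
      else best)
    0
termination_by remaining.length
decreasing_by
  all_goals
    have hm := d.2
    have h1 := List.length_erase_of_mem hm
    have h2 := List.length_pos_of_mem hm
    omega

def solution_alt (k : Int) (dungeons : List (List Int)) : Int :=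
  solution_alt_dfs k dungeons

-- ===== PRECONDITION & SPEC =====
-- Exactly the inputs where Python A returns: on dungeons = [] max([]) raises ValueError,
-- and a row whose length is not 2 makes the unpack 'need_k, use_k = dungeons[i]' raise ValueError.
def Pre_solution (k : Int) (dungeons : List (List Int)) : Prop :=
  dungeons ≠ [] ∧ ∀ row ∈ dungeons, row.length = 2

instance (k : Int) (dungeons : List (List Int)) : Decidable (Pre_solution k dungeons) := by
  unfold Pre_solution; infer_instance

def pvWitness_solution : Int × List (List Int) := (5, [[3, 2], [1, 1]])

def Spec_solution (k : Int) (dungeons : List (List Int)) (out : Int) : Prop := out = solution_alt k dungeons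
instance (k : Int) (dungeons : List (List Int)) (out : Int) : Decidable (Spec_solution k dungeons out) := by unfold Spec_solution; infer_instance

-- ===== CLAIM (what is proved, stated in full; the proofs are below) =====
def Claim_equal_solution : Prop := ∀ (k : Int) (dungeons : List (List Int)), Dom_solution k dungeons → Pre_solution k dungeons → Spec_solution k dungeons (solution k dungeons)

-- ===== LEMMAS AND PROOFS =====

-- row accessors (proof-side shorthands for the pyGetD unpacks both ports perform)
def pvNeed (r : List Int) : Int := PySem.List.pyGetD r 0 0
def pvUse (r : List Int) : Int := PySem.List.pyGetD r 1 0
def pvRow (dungeons : List (List Int)) (i : Int) : List Int := PySem.List.pyGetD dungeons i []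

-- greedy final count of A's inner loop along a fixed order of rows
def pvG (t : Int) : List (List Int) → Int
  | [] => 0
  | r :: rest => if t ≥ pvNeed r then 1 + pvG (t - pvUse r) rest else pvG t rest

-- the successive dun_cnt values A appends along a fixed order of rows
def pvCounts (t c : Int) : List (List Int) → List Int
  | [] => []
  | r :: rest =>
    if t ≥ pvNeed r then (c + 1) :: pvCounts (t - pvUse r) (c + 1) rest
    else c :: pvCounts t c rest

-- ---- generic facts about B's conditional running-max fold ----

theorem pv_foldl_cmax_init_le {γ : Type} (L : List γ) (P : γ → Prop) [DecidablePred P]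
    (v : γ → Int) (b : Int) :
    b ≤ L.foldl (fun best d => if P d then (if v d > best then v d else best) else best) b := by
  induction L generalizing b with
  | nil => simp
  | cons x t ih =>
    refine le_trans ?_ (ih _)
    dsimp only []
    split_ifs <;> omega

theorem pv_foldl_cmax_le_of_mem {γ : Type} (L : List γ) (P : γ → Prop) [DecidablePred P]
    (v : γ → Int) (d : γ) (hP : P d) :
    ∀ b : Int, d ∈ L →
      v d ≤ L.foldl (fun best d => if P d then (if v d > best then v d else best) else best) b := by
  induction L with
  | nil => intro b hd; cases hd
  | cons x t ih =>
    intro b hd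
    rcases List.mem_cons.mp hd with h | h
    · subst h
      refine le_trans ?_ (pv_foldl_cmax_init_le t P v _)
      dsimp only []
      split_ifs <;> omega
    · exact ih _ h

theorem pv_foldl_cmax_le {γ : Type} (L : List γ) (P : γ → Prop) [DecidablePred P]
    (v : γ → Int) (B : Int) (h : ∀ d ∈ L, P d → v d ≤ B) :
    ∀ b : Int, b ≤ B →
      L.foldl (fun best d => if P d then (if v d > best then v d else best) else best) b ≤ B := by
  induction L with
  | nil => intro b hb; simpa using hb
  | cons x t ih =>
    intro b hb
    refine ih (fun d hd hp => h d (List.mem_cons_of_mem _ hd) hp) _ ?_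
    dsimp only []
    split_ifs with h1 h2
    · exact h x List.mem_cons_self h1
    · exact hb
    · exact hb

theorem pv_foldl_cmax_cases {γ : Type} (L : List γ) (P : γ → Prop) [DecidablePred P]
    (v : γ → Int) (b : Int) :
    L.foldl (fun best d => if P d then (if v d > best then v d else best) else best) b = b ∨
      ∃ d ∈ L, P d ∧
        L.foldl (fun best d => if P d then (if v d > best then v d else best) else best) b = v d := by
  induction L generalizing b with
  | nil => left; rfl
  | cons x t ih =>
    rcases ih (if P x then (if v x > b then v x else b) else b) with h | ⟨d, hd, hP, hEq⟩
    · by_cases hx : P x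
      · by_cases hgt : v x > b
        · right; exact ⟨x, List.mem_cons_self, hx, by simp only [List.foldl_cons]; rw [h]; simp [hx, hgt]⟩
        · left; simp only [List.foldl_cons]; rw [h]; simp [hx, hgt]
      · left; simp only [List.foldl_cons]; rw [h]; simp [hx]
    · right; exact ⟨d, List.mem_cons_of_mem _ hd, hP, hEq⟩

-- ---- facts about B's dfs ----

theorem dfs_unfold (t : Int) (rem : List (List Int)) :
    solution_alt_dfs t rem =
      rem.attach.foldl
        (fun best d =>
          if t ≥ pvNeed d.1 then
            (if 1 + solution_alt_dfs (t - pvUse d.1) (rem.erase d.1) > best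
             then 1 + solution_alt_dfs (t - pvUse d.1) (rem.erase d.1) else best)
          else best) 0 := by
  rw [solution_alt_dfs]; rfl

theorem dfs_nonneg (t : Int) (rem : List (List Int)) : 0 ≤ solution_alt_dfs t rem := by
  rw [dfs_unfold t rem]
  exact pv_foldl_cmax_init_le rem.attach (fun d => t ≥ pvNeed d.1)
    (fun d => 1 + solution_alt_dfs (t - pvUse d.1) (rem.erase d.1)) 0

theorem dfs_ge_cand (t : Int) (rem : List (List Int)) (d : List Int)
    (hd : d ∈ rem) (h : t ≥ pvNeed d) :
    1 + solution_alt_dfs (t - pvUse d) (rem.erase d) ≤ solution_alt_dfs t rem := by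
  rw [dfs_unfold t rem]
  exact pv_foldl_cmax_le_of_mem rem.attach (fun d => t ≥ pvNeed d.1)
    (fun d => 1 + solution_alt_dfs (t - pvUse d.1) (rem.erase d.1)) ⟨d, hd⟩ h 0
    (List.mem_attach _ _)

theorem dfs_le (t : Int) (rem : List (List Int)) (B : Int) (h0 : 0 ≤ B)
    (h : ∀ d ∈ rem, t ≥ pvNeed d → 1 + solution_alt_dfs (t - pvUse d) (rem.erase d) ≤ B) :
    solution_alt_dfs t rem ≤ B := by
  rw [dfs_unfold t rem]
  exact pv_foldl_cmax_le rem.attach (fun d => t ≥ pvNeed d.1)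
    (fun d => 1 + solution_alt_dfs (t - pvUse d.1) (rem.erase d.1)) B
    (fun d _ hp => h d.1 d.2 hp) 0 h0

theorem dfs_cases (t : Int) (rem : List (List Int)) :
    solution_alt_dfs t rem = 0 ∨
      ∃ d ∈ rem, t ≥ pvNeed d ∧
        solution_alt_dfs t rem = 1 + solution_alt_dfs (t - pvUse d) (rem.erase d) := by
  rw [dfs_unfold t rem]
  rcases pv_foldl_cmax_cases rem.attach (fun d => t ≥ pvNeed d.1)
    (fun d => 1 + solution_alt_dfs (t - pvUse d.1) (rem.erase d.1)) 0 with h | ⟨d, _, hP, hEq⟩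
  · exact Or.inl h
  · exact Or.inr ⟨d.1, d.2, hP, hEq⟩

-- removing a dungeon cannot increase the best reachable count
theorem dfs_erase_le_aux : ∀ (n : Nat) (rem : List (List Int)), rem.length ≤ n →
    ∀ (t : Int) (a : List Int), a ∈ rem →
      solution_alt_dfs t (rem.erase a) ≤ solution_alt_dfs t rem := by
  intro n
  induction n with
  | zero => intro rem hlen t a ha; have := List.length_pos_of_mem ha; omega
  | succ n ih =>
    intro rem hlen t a ha
    refine dfs_le _ _ _ (dfs_nonneg _ _) ?_
    intro d hd hcl
    have hdrem : d ∈ rem := List.mem_of_mem_erase hd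
    have haerase : a ∈ rem.erase d := by
      by_cases had : a = d
      · subst had; exact hd
      · exact (List.mem_erase_of_ne had).mpr ha
    have hlen' : (rem.erase d).length ≤ n := by
      have := List.length_erase_of_mem hdrem
      have := List.length_pos_of_mem hdrem
      omega
    calc 1 + solution_alt_dfs (t - pvUse d) ((rem.erase a).erase d)
        = 1 + solution_alt_dfs (t - pvUse d) ((rem.erase d).erase a) := by rw [List.erase_comm]
      _ ≤ 1 + solution_alt_dfs (t - pvUse d) (rem.erase d) := by
          have := ih (rem.erase d) hlen' (t - pvUse d) a haerase; omega
      _ ≤ solution_alt_dfs t rem := dfs_ge_cand t rem d hdrem hcl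

theorem dfs_erase_le (t : Int) (rem : List (List Int)) (a : List Int) (ha : a ∈ rem) :
    solution_alt_dfs t (rem.erase a) ≤ solution_alt_dfs t rem :=
  dfs_erase_le_aux rem.length rem le_rfl t a ha

-- ---- every count A ever appends is bounded by B's dfs value ----

theorem counts_le : ∀ (rows R : List (List Int)) (t c : Int), rows.Subperm R →
    ∀ e ∈ pvCounts t c rows, e ≤ c + solution_alt_dfs t R := by
  intro rows
  induction rows with
  | nil => intro R t c _ e he; cases he
  | cons r rest ih =>
    intro R t c hsub e he
    have hrR : r ∈ R := hsub.subset List.mem_cons_self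
    have hrest : rest.Subperm (R.erase r) := by
      have h1 : (r :: rest).Subperm (r :: R.erase r) :=
        hsub.trans (List.perm_cons_erase hrR).subperm
      exact (List.subperm_cons r).mp h1
    by_cases hcl : t ≥ pvNeed r
    · rw [pvCounts, if_pos hcl] at he
      rcases List.mem_cons.mp he with h | h
      · subst h
        have h1 := dfs_ge_cand t R r hrR hcl
        have h2 := dfs_nonneg (t - pvUse r) (R.erase r)
        omega
      · have := ih (R.erase r) (t - pvUse r) (c + 1) hrest e h
        have h1 := dfs_ge_cand t R r hrR hcl
        omega
    · rw [pvCounts, if_neg hcl] at he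
      rcases List.mem_cons.mp he with h | h
      · subst h
        have := dfs_nonneg t R; omega
      · have := ih (R.erase r) t c hrest e h
        have := dfs_erase_le t R r hrR
        omega

-- the final greedy count is among the appended counts
theorem g_mem_counts : ∀ (rows : List (List Int)) (t c : Int), rows ≠ [] →
    c + pvG t rows ∈ pvCounts t c rows := by
  intro rows
  induction rows with
  | nil => intro t c h; exact absurd rfl h
  | cons r rest ih =>
    intro t c _
    by_cases hcl : t ≥ pvNeed r
    · rw [pvCounts, if_pos hcl, pvG, if_pos hcl]
      by_cases hr : rest = []
      · subst hr; simp [pvG]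
      · have := ih (t - pvUse r) (c + 1) hr
        refine List.mem_cons_of_mem _ ?_
        have : c + (1 + pvG (t - pvUse r) rest) = c + 1 + pvG (t - pvUse r) rest := by ring
        rw [this]
        exact ih (t - pvUse r) (c + 1) hr
    · rw [pvCounts, if_neg hcl, pvG, if_neg hcl]
      by_cases hr : rest = []
      · subst hr; simp [pvG]
      · exact List.mem_cons_of_mem _ (ih t c hr)

theorem pvG_nonneg : ∀ (t : Int) (rows : List (List Int)), 0 ≤ pvG t rows := by
  intro t rows
  induction rows generalizing t with
  | nil => simp [pvG]
  | cons r rest ih =>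
    rw [pvG]
    split_ifs with h
    · have := ih (t - pvUse r); omega
    · exact ih t

-- some visiting order achieves B's dfs value greedily
theorem exists_perm_ge_aux : ∀ (n : Nat) (rem : List (List Int)), rem.length ≤ n →
    ∀ t : Int, ∃ p : List (List Int), p.Perm rem ∧ solution_alt_dfs t rem ≤ pvG t p := by
  intro n
  induction n with
  | zero =>
    intro rem hlen t
    have : rem = [] := List.length_eq_zero_iff.mp (Nat.le_zero.mp hlen)
    subst this
    refine ⟨[], List.Perm.refl _, ?_⟩
    have := dfs_le t [] 0 le_rfl (by intro d hd; cases hd)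
    simpa [pvG] using this
  | succ n ih =>
    intro rem hlen t
    rcases dfs_cases t rem with h | ⟨d, hd, hcl, hEq⟩
    · exact ⟨rem, List.Perm.refl _, by rw [h]; exact pvG_nonneg t rem⟩
    · have hlen' : (rem.erase d).length ≤ n := by
        have := List.length_erase_of_mem hd
        have := List.length_pos_of_mem hd
        omega
      rcases ih (rem.erase d) hlen' (t - pvUse d) with ⟨p', hp', hle⟩
      refine ⟨d :: p', ?_, ?_⟩
      · exact (hp'.cons d).trans (List.perm_cons_erase hd).symm
      · rw [hEq, pvG, if_pos hcl]; omega

-- ---- A's permutation generator ----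

theorem mem_pyPermutations_perm : ∀ (n : Nat) (l : List Int), l.length ≤ n →
    ∀ p ∈ pyPermutations l, p.Perm l := by
  intro n
  induction n with
  | zero =>
    intro l hlen p hp
    have : l = [] := List.length_eq_zero_iff.mp (Nat.le_zero.mp hlen)
    subst this
    rw [pyPermutations] at hp
    simp at hp
    simp [hp]
  | succ n ih =>
    intro l hlen p hp
    rw [pyPermutations] at hp
    by_cases hl : l.isEmpty
    · rw [if_pos hl] at hp
      simp at hp
      simp [hp, List.isEmpty_iff.mp hl]
    · rw [if_neg hl] at hp
      rcases List.mem_flatMap.mp hp with ⟨x, _, hx2⟩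
      rcases List.mem_map.mp hx2 with ⟨q, hq1, hq2⟩
      have hxl : x.1 ∈ l := x.2
      have hlen' : (l.erase x.1).length ≤ n := by
        have := List.length_erase_of_mem hxl
        have := List.length_pos_of_mem hxl
        omega
      have hqperm := ih (l.erase x.1) hlen' q hq1
      rw [← hq2]
      exact (hqperm.cons x.1).trans (List.perm_cons_erase hxl).symm

theorem perm_mem_pyPermutations : ∀ (n : Nat) (l : List Int), l.length ≤ n →
    ∀ p : List Int, p.Perm l → p ∈ pyPermutations l := by
  intro n
  induction n with
  | zero =>
    intro l hlen p hperm
    have : l = [] := List.length_eq_zero_iff.mp (Nat.le_zero.mp hlen)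
    subst this
    have : p = [] := List.perm_nil.mp hperm
    subst this
    rw [pyPermutations]; simp
  | succ n ih =>
    intro l hlen p hperm
    cases p with
    | nil =>
      have : l = [] := (List.perm_nil.mp hperm.symm)
      subst this
      rw [pyPermutations]; simp
    | cons x q =>
      have hxl : x ∈ l := hperm.subset List.mem_cons_self
      have hlne : ¬ l.isEmpty := by
        intro h; rw [List.isEmpty_iff.mp h] at hxl; cases hxl
      have hq : q.Perm (l.erase x) := by
        have h1 : (x :: q).Perm (x :: l.erase x) := hperm.trans (List.perm_cons_erase hxl)
        exact h1.cons_inv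
      have hlen' : (l.erase x).length ≤ n := by
        have := List.length_erase_of_mem hxl
        have := List.length_pos_of_mem hxl
        omega
      have hqmem := ih (l.erase x) hlen' q hq
      rw [pyPermutations, if_neg hlne]
      refine List.mem_flatMap.mpr ⟨⟨x, hxl⟩, List.mem_attach _ _, ?_⟩
      exact List.mem_map.mpr ⟨q, hqmem, rfl⟩

-- ---- permutations of mapped rows have index-permutation preimages ----

theorem erase_map_first {α β : Type} [DecidableEq α] [DecidableEq β] (f : α → β) :
    ∀ (l : List α) (b : β), b ∈ l.map f →
      ∃ a, a ∈ l ∧ f a = b ∧ (l.map f).erase b = (l.erase a).map f := by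
  intro l
  induction l with
  | nil => intro b hb; cases hb
  | cons x t ih =>
    intro b hb
    by_cases hx : f x = b
    · exact ⟨x, List.mem_cons_self, hx, by simp [← hx]⟩
    · have hbt : b ∈ t.map f := by
        rcases List.mem_map.mp hb with ⟨a, ha1, ha2⟩
        rcases List.mem_cons.mp ha1 with h | h
        · subst h; exact absurd ha2 hx
        · exact List.mem_map.mpr ⟨a, h, ha2⟩
      rcases ih b hbt with ⟨a, ha1, ha2, ha3⟩
      have hax : a ≠ x := by intro h; subst h; exact hx ha2
      refine ⟨a, List.mem_cons_of_mem _ ha1, ha2, ?_⟩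
      rw [List.map_cons, List.erase_cons_tail (by simp [hx]),
        List.erase_cons_tail (by simp [Ne.symm hax]), List.map_cons, ha3]

theorem exists_preimage_perm {α β : Type} [DecidableEq α] [DecidableEq β] (f : α → β) :
    ∀ (p : List β) (l : List α), p.Perm (l.map f) →
      ∃ q : List α, q.Perm l ∧ q.map f = p := by
  intro p
  induction p with
  | nil =>
    intro l hperm
    have : l.map f = [] := List.perm_nil.mp hperm.symm
    have : l = [] := List.map_eq_nil_iff.mp this
    subst this
    exact ⟨[], List.Perm.refl _, rfl⟩
  | cons b p' ih =>
    intro l hperm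
    have hb : b ∈ l.map f := hperm.subset List.mem_cons_self
    rcases erase_map_first f l b hb with ⟨a, ha1, ha2, ha3⟩
    have hp' : p'.Perm ((l.erase a).map f) := by
      rw [← ha3]
      have h1 : (b :: p').Perm (b :: (l.map f).erase b) :=
        hperm.trans (List.perm_cons_erase hb)
      exact h1.cons_inv
    rcases ih (l.erase a) hp' with ⟨q', hq1, hq2⟩
    exact ⟨a :: q', (hq1.cons a).trans (List.perm_cons_erase ha1).symm,
      by rw [List.map_cons, hq2, ha2]⟩

-- ---- A's folds in terms of pvCounts ----

theorem foldA_third (dungeons : List (List Int)) :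
    ∀ (perm : List Int) (t c : Int) (acc : List Int),
      (perm.foldl (pvStepA dungeons) (t, c, acc)).2.2 =
        acc ++ pvCounts t c (perm.map (pvRow dungeons)) := by
  intro perm
  induction perm with
  | nil => intro t c acc; simp [pvCounts]
  | cons i rest ih =>
    intro t c acc
    rw [List.foldl_cons, List.map_cons, pvCounts]
    by_cases hcl : t ≥ pvNeed (pvRow dungeons i)
    · rw [if_pos hcl]
      have hstep : pvStepA dungeons (t, c, acc) i =
          (t - pvUse (pvRow dungeons i), c + 1, acc ++ [c + 1]) := by
        simp only [pvStepA, pvRow, pvNeed, pvUse] at *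
        rw [if_pos hcl]
      rw [hstep, ih]
      simp
    · rw [if_neg hcl]
      have hstep : pvStepA dungeons (t, c, acc) i = (t, c, acc ++ [c]) := by
        simp only [pvStepA, pvRow, pvNeed, pvUse] at *
        rw [if_neg hcl]
      rw [hstep, ih]
      simp

theorem foldA_outer (dungeons : List (List Int)) (k : Int) :
    ∀ (perms : List (List Int)) (acc0 : List Int),
      perms.foldl (fun acc perm => (perm.foldl (pvStepA dungeons) (k, 0, acc)).2.2) acc0 =
        acc0 ++ perms.flatMap (fun perm => pvCounts k 0 (perm.map (pvRow dungeons))) := by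
  intro perms
  induction perms with
  | nil => intro acc0; simp
  | cons p rest ih =>
    intro acc0
    rw [List.foldl_cons, ih, foldA_third]
    simp

-- range(len(dungeons)) maps back to dungeons itself
theorem map_row_range (dungeons : List (List Int)) :
    (PySem.List.pyRange 0 (PySem.List.len dungeons) 1).map (pvRow dungeons) = dungeons := by
  simpa [pvRow] using PySem.List.map_pyGetD_pyRange_zero dungeons ([] : List Int)

-- ===== VERDICT (by name: the statement is the Claim_ definition above) =====
theorem solution_spec : Claim_equal_solution := by
  intro k dungeons _ hpre
  unfold Spec_solution solution_alt
  obtain ⟨hne, _⟩ := hpre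
  have hmap := map_row_range dungeons
  have hsol : solution k dungeons =
      (PySem.List.max?
        ((pyPermutations (PySem.List.pyRange 0 (PySem.List.len dungeons) 1)).flatMap
          (fun perm => pvCounts k 0 (perm.map (pvRow dungeons))))
        (fun x => x)).getD 0 := by
    simp only [solution]
    rw [foldA_outer]
    simp
  -- every value A appends is at most B's answer
  have hbd : ∀ e ∈ (pyPermutations (PySem.List.pyRange 0 (PySem.List.len dungeons) 1)).flatMap
      (fun perm => pvCounts k 0 (perm.map (pvRow dungeons))),
      e ≤ solution_alt_dfs k dungeons := by
    intro e he
    rcases List.mem_flatMap.mp he with ⟨perm, hp, he'⟩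
    have hperm : perm.Perm (PySem.List.pyRange 0 (PySem.List.len dungeons) 1) :=
      mem_pyPermutations_perm _ _ le_rfl perm hp
    have hsub : (perm.map (pvRow dungeons)).Subperm dungeons := by
      have h := (hperm.map (pvRow dungeons)).subperm
      rw [hmap] at h
      exact h
    have := counts_le (perm.map (pvRow dungeons)) dungeons k 0 hsub e he'
    omega
  -- some value A appends equals B's answer from above
  rcases exists_perm_ge_aux dungeons.length dungeons le_rfl k with ⟨p, hpperm, hple⟩
  have hppre : p.Perm ((PySem.List.pyRange 0 (PySem.List.len dungeons) 1).map (pvRow dungeons)) := by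
    rw [hmap]; exact hpperm
  rcases exists_preimage_perm (pvRow dungeons) p _ hppre with ⟨q, hq1, hq2⟩
  have hqmem : q ∈ pyPermutations (PySem.List.pyRange 0 (PySem.List.len dungeons) 1) :=
    perm_mem_pyPermutations _ _ le_rfl q hq1
  have hpne : p ≠ [] := by
    intro h
    exact hne (List.Perm.nil_eq (h ▸ hpperm)).symm
  have hgmem : pvG k p ∈ (pyPermutations (PySem.List.pyRange 0 (PySem.List.len dungeons) 1)).flatMap
      (fun perm => pvCounts k 0 (perm.map (pvRow dungeons))) := by
    refine List.mem_flatMap.mpr ⟨q, hqmem, ?_⟩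
    rw [hq2]
    have := g_mem_counts p k 0 hpne
    simpa using this
  -- combine via the maximum
  cases hmx : PySem.List.max?
      ((pyPermutations (PySem.List.pyRange 0 (PySem.List.len dungeons) 1)).flatMap
        (fun perm => pvCounts k 0 (perm.map (pvRow dungeons)))) (fun x => x) with
  | none =>
    rw [PySem.List.max?_eq_none_iff] at hmx
    rw [hmx] at hgmem
    cases hgmem
  | some m =>
    have hmmem := PySem.List.max?_mem hmx
    have hmax := PySem.List.max?_isMax hmx
    have h1 : m ≤ solution_alt_dfs k dungeons := hbd m hmmem
    have h2 : pvG k p ≤ m := hmax _ hgmem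
    rw [hsol, hmx]
    simp only [Option.getD_some]
    omega
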